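-- pv_equiv track=rewrite | github.com/RikSmits06/AdventOfCode2024 | day12/main.py | sidesDown
-- ===== SOURCE A (Python) =====
-- def calcSidesDiff(group):
--     if len(group) == 1:
--         return 1
--     sides = 0
--     i = 0
--     last = -10
--     while i < len(group):
--         if group[i] - last != 1:
--             sides += 1
--         last = group[i]
--         i += 1
--     return sides
--
-- def sidesDown(borders):
--     sides = 0
--     sortedborders = [(c[0], c[1]) for c in borders if c[2] == "down"]
--     groups = {}
--     for b in sortedborders:
--         if b[1] in groups.keys():
--             groups[b[1]].append(b[0])
--         else:
--             groups[b[1]] = [b[0]]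
--     for group in groups.values():
--         group.sort()
--         sides += calcSidesDiff(group)
--     return sides
-- ===== SOURCE B (Python) =====
-- def sidesDown(borders):
--     pairs = sorted((c[1], c[0]) for c in borders if c[2] == "down")
--     sides = 0
--     prev = None
--     for y, x in pairs:
--         if prev is None or prev[0] != y or x - prev[1] != 1:
--             sides += 1
--         prev = (y, x)
--     return sides
-- ===== Notes on version B (the rewrite author's own statement) =====
-- stated objective: simpler
-- what changed: Replaces the dict-grouping by y plus per-group sort and sentinel-initialised while-loop with one global lexicographic sort of (y,x) pairs and a single pass that starts a new side whenever y changes or x is not the predecessor's successor.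
-- intended difference: On inputs where some y-group of 'down' borders has at least two elements and minimum x equal to -9, A's sentinel last=-10 makes the first element look contiguous so A undercounts that group's sides by 1, while B counts the group's first element as a new side, which is the intended run count. — e.g. on sidesDown([(-9, 0, "down"), (-8, 0, "down")]): A returns 0, B returns 1
import Mathlib
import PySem

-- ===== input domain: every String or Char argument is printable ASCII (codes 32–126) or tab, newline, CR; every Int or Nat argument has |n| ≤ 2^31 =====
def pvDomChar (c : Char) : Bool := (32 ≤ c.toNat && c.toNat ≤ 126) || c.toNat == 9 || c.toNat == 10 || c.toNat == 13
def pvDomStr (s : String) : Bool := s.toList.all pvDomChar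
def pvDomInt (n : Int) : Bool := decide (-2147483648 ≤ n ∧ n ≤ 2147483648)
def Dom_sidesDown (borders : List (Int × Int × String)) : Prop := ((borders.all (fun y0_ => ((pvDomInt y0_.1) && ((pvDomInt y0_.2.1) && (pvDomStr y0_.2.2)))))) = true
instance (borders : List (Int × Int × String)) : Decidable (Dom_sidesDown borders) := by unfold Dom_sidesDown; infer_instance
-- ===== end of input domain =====

-- B replaces A's dict grouping + per-group sort + sentinel-initialised index loop by ONE global
-- lexicographic sort of the (y, x) pairs and a single pass; simpler, and on groups whose minimal x is -9
-- (where A's last = -10 sentinel hides the first side) B returns the intended run count (see D_ below).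

-- ===== PORT A =====
def calcSidesDiff (group : List Int) : Int :=
  if group.length == 1 then 1
  else
    -- the 'while i < len(group)' index loop is the structural fold over group with state (sides, last)
    (group.foldl (fun (st : Int × Int) g =>
      (if g - st.2 ≠ 1 then st.1 + 1 else st.1, g)) (0, -10)).1

def sidesDown (borders : List (Int × Int × String)) : Int :=
  let sortedborders := (borders.filter (fun c => c.2.2 == "down")).map (fun c => (c.1, c.2.1))
  let groups := sortedborders.foldl (fun (d : PySem.Dict Int (List Int)) b =>
      if d.contains b.2 then d.modify b.2 [] (fun l => l ++ [b.1])
      else d.insert b.2 [b.1]) PySem.Dict.empty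
  groups.values.foldl (fun sides group => sides + calcSidesDiff (PySem.List.sorted group (fun x => x))) 0

-- ===== PORT B =====
def sidesDown_alt (borders : List (Int × Int × String)) : Int :=
  let pairs := PySem.List.sorted2
      ((borders.filter (fun c => c.2.2 == "down")).map (fun c => (c.2.1, c.1))) Prod.fst Prod.snd
  (pairs.foldl (fun (st : Int × Option (Int × Int)) p =>
      match st.2 with
      | none => (st.1 + 1, some p)
      | some q => (if q.1 ≠ p.1 ∨ p.2 - q.2 ≠ 1 then st.1 + 1 else st.1, some p)) (0, none)).1

-- ===== PRECONDITION & SPEC =====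
-- On inputs where some y-row of 'down' borders has ≥ 2 elements and minimal x = -9, A's sentinel
-- last = -10 makes the first element of that sorted group look contiguous, so A undercounts its sides
-- by 1 per such row; B counts the first element of every row as a new side, the intended run count.
def D_sidesDown (borders : List (Int × Int × String)) : Prop :=
  ∃ c ∈ borders, c.1 = -9 ∧ c.2.2 = "down" ∧
    2 ≤ borders.countP (fun c' => c'.2.2 == "down" && c'.2.1 == c.2.1) ∧
    ∀ c' ∈ borders, c'.2.2 = "down" → c'.2.1 = c.2.1 → -9 ≤ c'.1
instance (borders : List (Int × Int × String)) : Decidable (D_sidesDown borders) := by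
  unfold D_sidesDown; infer_instance

def Spec_sidesDown (borders : List (Int × Int × String)) (out : Int) : Prop :=
  ¬ D_sidesDown borders → out = sidesDown_alt borders
instance (borders : List (Int × Int × String)) (out : Int) : Decidable (Spec_sidesDown borders out) := by
  unfold Spec_sidesDown; infer_instance

def pvDiffWitness_sidesDown : (List (Int × Int × String)) := [(-9, 0, "down"), (-8, 0, "down")]
def pvDiffWitnessOut_sidesDown : Int × Int := (0, 1)

-- ===== CLAIM (what is proved, stated in full; the proofs are below) =====
def Claim_unchanged_sidesDown : Prop := ∀ (borders : List (Int × Int × String)), Dom_sidesDown borders → Spec_sidesDown borders (sidesDown borders)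
def Claim_changed_sidesDown : Prop := Dom_sidesDown (pvDiffWitness_sidesDown) ∧ D_sidesDown (pvDiffWitness_sidesDown) ∧ sidesDown (pvDiffWitness_sidesDown) = pvDiffWitnessOut_sidesDown.1 ∧ sidesDown_alt (pvDiffWitness_sidesDown) = pvDiffWitnessOut_sidesDown.2 ∧ pvDiffWitnessOut_sidesDown.1 ≠ pvDiffWitnessOut_sidesDown.2
def Claim_exact_sidesDown : Prop := ∀ (borders : List (Int × Int × String)), Dom_sidesDown borders → D_sidesDown borders → sidesDown borders ≠ sidesDown_alt borders

-- ===== LEMMAS AND PROOFS =====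

-- abbreviations used only by the proofs
def pvDowns (borders : List (Int × Int × String)) : List (Int × Int × String) :=
  borders.filter (fun c => c.2.2 == "down")
def pvXs (borders : List (Int × Int × String)) (y : Int) : List Int :=
  ((pvDowns borders).filter (fun c => c.2.1 == y)).map (fun c => c.1)
def pvBadGroup (g : List Int) : Bool :=
  decide (2 ≤ g.length) && decide ((-9 : Int) ∈ g) && g.all (fun x => decide ((-9 : Int) ≤ x))
def pvYs (borders : List (Int × Int × String)) : List Int := (pvDowns borders).map (fun c => c.2.1)
def pvKeys (borders : List (Int × Int × String)) : List Int := PySem.List.dedup (pvYs borders)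
def pvSortI (g : List Int) : List Int := PySem.List.sorted g (fun x => x)
def pvP (borders : List (Int × Int × String)) : List (Int × Int) :=
  (pvDowns borders).map (fun c => (c.1, c.2.1))
def pvQ (borders : List (Int × Int × String)) : List (Int × Int) :=
  (pvDowns borders).map (fun c => (c.2.1, c.1))
def pvGrp (P : List (Int × Int)) (y : Int) : List Int := (P.filter (fun p => p.2 == y)).map Prod.fst
def pvBuild (P : List (Int × Int)) : PySem.Dict Int (List Int) :=
  P.foldl (fun (d : PySem.Dict Int (List Int)) b =>
      if d.contains b.2 then d.modify b.2 [] (fun l => l ++ [b.1])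
      else d.insert b.2 [b.1]) PySem.Dict.empty
def pvRunS (st : Int × Int) (t : List Int) : Int × Int :=
  t.foldl (fun st x => (if x - st.2 ≠ 1 then st.1 + 1 else st.1, x)) st
def pvStepB (st : Int × Option (Int × Int)) (p : Int × Int) : Int × Option (Int × Int) :=
  match st.2 with
  | none => (st.1 + 1, some p)
  | some q => (if q.1 ≠ p.1 ∨ p.2 - q.2 ≠ 1 then st.1 + 1 else st.1, some p)
def pvCntB (g : List Int) : Int := match g with | [] => 0 | h :: t => 1 + (pvRunS (0, h) t).1
def pvBadI (g : List Int) : Int := if pvBadGroup g then 1 else 0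

-- ---- D_ in terms of the proof-side row abbreviations ----
lemma pv_mem_Xs (borders : List (Int × Int × String)) (y x : Int) :
    x ∈ pvXs borders y ↔ ∃ c ∈ borders, c.2.2 = "down" ∧ c.2.1 = y ∧ c.1 = x := by
  unfold pvXs pvDowns
  simp only [List.mem_map, List.mem_filter, beq_iff_eq]
  constructor
  · rintro ⟨c, ⟨⟨hc, hd⟩, hy⟩, hx⟩
    exact ⟨c, hc, hd, hy, hx⟩
  · rintro ⟨c, hc, hd, hy, hx⟩
    exact ⟨c, ⟨⟨hc, hd⟩, hy⟩, hx⟩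

lemma pv_len_Xs (borders : List (Int × Int × String)) (y : Int) :
    (pvXs borders y).length = borders.countP (fun c' => c'.2.2 == "down" && c'.2.1 == y) := by
  unfold pvXs pvDowns
  rw [List.length_map, List.filter_filter, ← List.countP_eq_length_filter]
  apply List.countP_congr
  intro c _
  simp [Bool.and_comm]

lemma pv_D_iff (borders : List (Int × Int × String)) :
    D_sidesDown borders ↔ ∃ c ∈ pvDowns borders, pvBadGroup (pvXs borders c.2.1) = true := by
  constructor
  · rintro ⟨c, hc, hx9, hdown, hcnt, hmin⟩
    refine ⟨c, ?_, ?_⟩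
    · unfold pvDowns
      rw [List.mem_filter]
      exact ⟨hc, by simp [hdown]⟩
    · unfold pvBadGroup
      simp only [Bool.and_eq_true, decide_eq_true_eq, List.all_eq_true]
      refine ⟨⟨?_, ?_⟩, ?_⟩
      · rw [pv_len_Xs]; exact hcnt
      · exact (pv_mem_Xs _ _ _).mpr ⟨c, hc, hdown, rfl, hx9⟩
      · intro x hx
        obtain ⟨c', hc', hd', hy', hx'⟩ := (pv_mem_Xs _ _ _).mp hx
        subst hx'
        simpa using hmin c' hc' hd' hy'
  · rintro ⟨c, hc, hb⟩
    unfold pvDowns at hc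
    rw [List.mem_filter] at hc
    obtain ⟨hcb, hcd⟩ := hc
    unfold pvBadGroup at hb
    simp only [Bool.and_eq_true, decide_eq_true_eq, List.all_eq_true] at hb
    obtain ⟨⟨hlen, hmem9⟩, hall⟩ := hb
    obtain ⟨c', hc', hd', hy', hx'⟩ := (pv_mem_Xs _ _ _).mp hmem9
    refine ⟨c', hc', hx', hd', ?_, ?_⟩
    · rw [hy', ← pv_len_Xs]; exact hlen
    · intro c'' hc'' hd'' hy''
      rw [hy'] at hy''
      have : c''.1 ∈ pvXs borders c.2.1 := (pv_mem_Xs _ _ _).mpr ⟨c'', hc'', hd'', hy'', rfl⟩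
      simpa using hall _ this

-- ---- generic small lemmas ----
lemma pv_foldl_add_map {α : Type} (h : α → Int) (l : List α) (s0 : Int) :
    l.foldl (fun s x => s + h x) s0 = s0 + (l.map h).sum := by
  induction l generalizing s0 with
  | nil => simp
  | cons a t ih => simp [ih, add_assoc]

lemma pv_runS_shift (t : List Int) (s l : Int) :
    pvRunS (s, l) t = (s + (pvRunS (0, l) t).1, (pvRunS (0, l) t).2) := by
  induction t generalizing s l with
  | nil => simp [pvRunS]
  | cons a t ih =>
      show pvRunS ((if a - l ≠ 1 then s + 1 else s), a) t
         = (s + (pvRunS ((if a - l ≠ 1 then 0 + 1 else 0), a) t).1,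
            (pvRunS ((if a - l ≠ 1 then 0 + 1 else 0), a) t).2)
      rw [ih, ih (if a - l ≠ 1 then 0 + 1 else 0) a]
      split_ifs with h
      · simp
        ring
      · simp

-- ---- dict characterisation (A side) ----
lemma pv_dedup_append_one (l : List Int) (a : Int) :
    PySem.List.dedup (l ++ [a]) = if a ∈ l then PySem.List.dedup l else PySem.List.dedup l ++ [a] := by
  show PySem.Set.ofList (l ++ [a]) = _
  unfold PySem.Set.ofList
  rw [List.foldl_append]
  show PySem.Set.add (PySem.Set.ofList l) a = _
  unfold PySem.Set.add
  by_cases h : a ∈ l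
  · have hc : (PySem.Set.ofList l).contains a = true := by
      simp [PySem.Set.contains, PySem.Set.mem_ofList, h]
    simp [h]
  · have hc : (PySem.Set.ofList l).contains a = false := by
      simp [PySem.Set.contains, PySem.Set.mem_ofList, h]
    simp [h]

lemma pv_getD_map (ds : List Int) (g : Int → List Int) (k : Int) (hk : k ∈ ds) :
    (PySem.Dict.mk (ds.map (fun y => (y, g y)))).getD k [] = g k := by
  induction ds with
  | nil => simp at hk
  | cons d ds ih =>
      by_cases h : d = k
      · subst h
        simp [PySem.Dict.getD, PySem.Dict.get?]
      · have hk' : k ∈ ds := by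
          rcases List.mem_cons.mp hk with h' | h'
          · exact absurd h'.symm h
          · exact h'
        have := ih hk'
        simp only [PySem.Dict.getD, PySem.Dict.get?, List.map_cons, List.find?_cons] at this ⊢
        have hb : ((d, g d).1 == k) = false := by simpa using h
        simp [hb] at this ⊢
        exact this

lemma pv_contains_map (ds : List Int) (g : Int → List Int) (k : Int) :
    (PySem.Dict.mk (ds.map (fun y => (y, g y)))).contains k = decide (k ∈ ds) := by
  simp only [PySem.Dict.contains, List.any_map, Function.comp_def]
  induction ds with
  | nil => simp
  | cons d ds ih =>
      by_cases h : d = k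
      · subst h; simp
      · simp [List.any_cons, ih, h, List.mem_cons, Ne.symm h]

lemma pv_grp_append_one (P : List (Int × Int)) (q : Int × Int) (y : Int) :
    pvGrp (P ++ [q]) y = pvGrp P y ++ if q.2 = y then [q.1] else [] := by
  unfold pvGrp
  rw [List.filter_append]
  by_cases h : q.2 = y
  · simp [h]
  · simp [h]

lemma pv_build_items (P : List (Int × Int)) :
    (pvBuild P).items = (PySem.List.dedup (P.map Prod.snd)).map (fun y => (y, pvGrp P y)) := by
  induction P using List.reverseRecOn with
  | nil => rfl
  | append_singleton P p ih =>
      have hstep : pvBuild (P ++ [p])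
          = (if (pvBuild P).contains p.2
             then (pvBuild P).modify p.2 [] (fun l => l ++ [p.1])
             else (pvBuild P).insert p.2 [p.1]) := by
        unfold pvBuild
        rw [List.foldl_append]
        rfl
      have hD : pvBuild P
          = PySem.Dict.mk ((PySem.List.dedup (P.map Prod.snd)).map (fun y => (y, pvGrp P y))) :=
        PySem.Dict.ext ih
      have hsnd : (P ++ [p]).map Prod.snd = P.map Prod.snd ++ [p.2] := by simp
      by_cases hp : p.2 ∈ P.map Prod.snd
      · have hmem : p.2 ∈ PySem.List.dedup (P.map Prod.snd) := by
          show p.2 ∈ PySem.Set.ofList (P.map Prod.snd)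
          exact (PySem.Set.mem_ofList _ _).mpr hp
        have hc : (pvBuild P).contains p.2 = true := by
          rw [hD, pv_contains_map]
          simpa using hmem
        rw [hstep, if_pos hc]
        unfold PySem.Dict.modify
        rw [hD]
        have hg : (PySem.Dict.mk ((PySem.List.dedup (P.map Prod.snd)).map
              (fun y => (y, pvGrp P y)))).getD p.2 [] = pvGrp P p.2 :=
          pv_getD_map _ _ _ hmem
        rw [hg]
        have hc' : (PySem.Dict.mk ((PySem.List.dedup (P.map Prod.snd)).map
              (fun y => (y, pvGrp P y)))).contains p.2 = true := by
          rw [pv_contains_map]; simpa using hmem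
        unfold PySem.Dict.insert
        rw [hc']
        simp only [if_true]
        rw [hsnd, pv_dedup_append_one, if_pos hp]
        show ((PySem.List.dedup (P.map Prod.snd)).map (fun y => (y, pvGrp P y))).map
            (fun q => if q.1 == p.2 then (p.2, pvGrp P p.2 ++ [p.1]) else q) = _
        rw [List.map_map]
        apply List.map_congr_left
        intro y _
        by_cases hy : y = p.2
        · subst hy
          simp [pv_grp_append_one]
        · have hb : (y == p.2) = false := by simpa using hy
          simp [Function.comp_def, hb, pv_grp_append_one, Ne.symm hy]
          exact hy
      · have hmem : p.2 ∉ PySem.List.dedup (P.map Prod.snd) := by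
          show p.2 ∉ PySem.Set.ofList (P.map Prod.snd)
          simpa [PySem.Set.mem_ofList] using hp
        have hc : (pvBuild P).contains p.2 = false := by
          rw [hD, pv_contains_map]
          simpa using hmem
        rw [hstep, if_neg (by simp [hc])]
        unfold PySem.Dict.insert
        rw [hc]
        simp only [Bool.false_eq_true, if_false]
        rw [hsnd, pv_dedup_append_one, if_neg hp]
        show (pvBuild P).items ++ [(p.2, [p.1])] = _
        rw [ih, List.map_append]
        congr 1
        · apply List.map_congr_left
          intro y hy
          have hyy : y ∈ P.map Prod.snd := by
            have := (PySem.Set.mem_ofList (P.map Prod.snd) y).mp hy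
            exact this
          have hne : p.2 ≠ y := fun h => hp (h ▸ hyy)
          simp [pv_grp_append_one, hne]
        · have hnil : pvGrp P p.2 = [] := by
            unfold pvGrp
            have : P.filter (fun q => q.2 == p.2) = [] := by
              rw [List.filter_eq_nil_iff]
              intro q hq
              simp only [beq_iff_eq]
              intro h
              exact hp (List.mem_map.mpr ⟨q, hq, h⟩)
            rw [this]; rfl
          simp [pv_grp_append_one, hnil]

-- ---- A as a sum over rows ----
lemma pv_grp_P (borders : List (Int × Int × String)) (y : Int) :
    pvGrp (pvP borders) y = pvXs borders y := by
  unfold pvGrp pvP pvXs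
  rw [List.filter_map, List.map_map]
  rfl

lemma pv_P_snd (borders : List (Int × Int × String)) :
    (pvP borders).map Prod.snd = pvYs borders := by
  simp [pvP, pvYs, List.map_map]

lemma pv_A_sum (borders : List (Int × Int × String)) :
    sidesDown borders
      = ((pvKeys borders).map (fun y => calcSidesDiff (pvSortI (pvXs borders y)))).sum := by
  have h0 : sidesDown borders
      = ((pvBuild (pvP borders)).values).foldl
          (fun sides group => sides + calcSidesDiff (PySem.List.sorted group (fun x => x))) 0 := rfl
  rw [h0, pv_foldl_add_map (fun g => calcSidesDiff (PySem.List.sorted g (fun x => x)))]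
  show 0 + (((pvBuild (pvP borders)).items.map (fun x => x.2)).map
      (fun g => calcSidesDiff (PySem.List.sorted g (fun x => x)))).sum = _
  rw [pv_build_items, pv_P_snd, List.map_map, List.map_map]
  rw [zero_add]
  show ((pvKeys borders).map _).sum = _
  apply congrArg List.sum
  apply List.map_congr_left
  intro y _
  simp only [Function.comp_def, pv_grp_P]
  rfl

-- ---- B: sorted2 is the lexicographic sort ----
lemma pv_sorted2_eq_lex (xs : List (Int × Int)) :
    PySem.List.sorted2 xs Prod.fst Prod.snd
      = PySem.List.sorted xs (fun q => toLex q) := by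
  rw [PySem.List.sorted_eq_foldl_insertBy]
  unfold PySem.List.sorted2
  simp only []
  congr 1
  funext acc x
  congr 1
  funext a b
  rcases lt_trichotomy a.1 b.1 with h | h | h
  · have h2 : ¬ b.1 < a.1 := by omega
    simp [h, h2, Prod.Lex.toLex_lt_toLex]
  · have h1 : ¬ a.1 < b.1 := by omega
    have h2 : ¬ b.1 < a.1 := by omega
    by_cases h3 : a.2 < b.2 <;> simp [h1, h2, h, Prod.Lex.toLex_lt_toLex]
  · have h1 : ¬ a.1 < b.1 := by omega
    have h3 : ¬ a.1 = b.1 := by omega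
    simp [h1, h, h3, Prod.Lex.toLex_lt_toLex]

-- ---- B: the sorted pair list is the concatenation of the sorted rows ----
def pvBlocks (borders : List (Int × Int × String)) : List (Int × Int) :=
  (pvSortI (pvKeys borders)).flatMap (fun y => (pvSortI (pvXs borders y)).map (fun x => (y, x)))

lemma pv_count_map_pair (g : List Int) (y : Int) (q : Int × Int) :
    (g.map (fun x => (y, x))).count q = if q.1 = y then g.count q.2 else 0 := by
  induction g with
  | nil => simp
  | cons a g ih =>
      simp only [List.map_cons, List.count_cons, ih]
      by_cases h1 : q.1 = y
      · by_cases h2 : q.2 = a <;>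
          simp [h1, h2, Prod.ext_iff]
      · simp [h1, Prod.ext_iff]
        intro h
        exact absurd h.symm h1

lemma pv_sum_ite_eq_mem (ds : List Int) (hnd : ds.Nodup) (k : Int) (v : Int → Nat) :
    ((ds.map (fun y => if k = y then v y else 0)).sum) = if k ∈ ds then v k else 0 := by
  induction ds with
  | nil => simp
  | cons d ds ih =>
      rcases List.nodup_cons.mp hnd with ⟨hd, hnd'⟩
      simp only [List.map_cons, List.sum_cons]
      by_cases h : k = d
      · subst h
        rw [ih hnd']
        simp [hd]
      · simp [h, ih hnd', List.mem_cons]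

lemma pv_filter_not_mem (L : List (Int × Int × String)) (y : Int)
    (h : y ∉ L.map (fun c => c.2.1)) : L.filter (fun c => c.2.1 == y) = [] := by
  rw [List.filter_eq_nil_iff]
  intro c hc
  simp only [beq_iff_eq]
  intro he
  exact h (List.mem_map.mpr ⟨c, hc, he⟩)

lemma pv_count_Q_aux (L : List (Int × Int × String)) (q : Int × Int) :
    (L.map (fun c => (c.2.1, c.1))).count q
      = if q.1 ∈ L.map (fun c => c.2.1)
        then ((L.filter (fun c => c.2.1 == q.1)).map (fun c => c.1)).count q.2 else 0 := by
  induction L with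
  | nil => simp
  | cons c L ih =>
      simp only [List.map_cons, List.count_cons, List.filter_cons]
      by_cases h1 : c.2.1 = q.1
      · by_cases hm : q.1 ∈ L.map (fun c => c.2.1)
        · simp [ih, hm, h1, Prod.ext_iff, List.mem_cons]
          rw [List.count_cons]
          by_cases h2 : q.2 = c.1
          · simp [h2]
          · have h3 : ¬ c.1 = q.2 := fun h => h2 h.symm
            simp [h3]
        · simp [ih, hm, h1, pv_filter_not_mem L q.1 hm, Prod.ext_iff, List.mem_cons]
          rw [List.count_cons]
          by_cases h2 : q.2 = c.1
          · simp [h2]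
          · have h3 : ¬ c.1 = q.2 := fun h => h2 h.symm
            simp [h3]
      · have h1' : ¬ q.1 = c.2.1 := fun h => h1 h.symm
        simp only [ih, beq_iff_eq, h1, if_false, Prod.ext_iff]
        by_cases hm : q.1 ∈ List.map (fun c => c.2.1) L
        · simp [hm, List.mem_cons, h1']
        · simp [hm, List.mem_cons, h1']

lemma pv_count_Q (borders : List (Int × Int × String)) (q : Int × Int) :
    (pvQ borders).count q = if q.1 ∈ pvYs borders then (pvXs borders q.1).count q.2 else 0 := by
  unfold pvQ pvYs pvXs
  exact pv_count_Q_aux (pvDowns borders) q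

lemma pv_mem_ys_iff (borders : List (Int × Int × String)) (y : Int) :
    y ∈ pvYs borders ↔ pvXs borders y ≠ [] := by
  unfold pvYs pvXs
  simp only [ne_eq, List.map_eq_nil_iff, List.filter_eq_nil_iff, List.mem_map]
  constructor
  · rintro ⟨c, hc, h⟩ hall
    exact hall c hc (by simp [h])
  · intro h
    by_contra hno
    apply h
    intro c hc hb
    exact hno ⟨c, hc, by simpa using hb⟩

lemma pv_keys_sorted_lt (borders : List (Int × Int × String)) :
    (pvSortI (pvKeys borders)).Pairwise (· < ·) := by
  show (PySem.List.sorted (PySem.Set.ofList (pvYs borders)) (fun x => x)).Pairwise (· < ·)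
  exact PySem.List.sorted_ofList_pairwise_lt (pvYs borders)

lemma pv_blocks_perm (borders : List (Int × Int × String)) :
    (pvBlocks borders).Perm (pvQ borders) := by
  rw [List.perm_iff_count]
  intro q
  unfold pvBlocks
  rw [List.count_flatMap]
  have hpt : ∀ y ∈ pvSortI (pvKeys borders),
      (List.count q ∘ fun y => (pvSortI (pvXs borders y)).map (fun x => (y, x))) y
        = if q.1 = y then (pvXs borders y).count q.2 else 0 := by
    intro y _
    simp only [Function.comp_apply]
    rw [pv_count_map_pair]
    by_cases h : q.1 = y
    · subst h
      simp [pvSortI,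
        List.Perm.count_eq (PySem.List.sorted_perm (pvXs borders q.1) (fun x => x) false)]
    · simp [h]
  rw [List.map_congr_left hpt]
  have hnd : (pvSortI (pvKeys borders)).Nodup :=
    (pv_keys_sorted_lt borders).imp ne_of_lt
  rw [pv_sum_ite_eq_mem _ hnd q.1 (fun y => (pvXs borders y).count q.2)]
  rw [pv_count_Q]
  have hmem : q.1 ∈ pvSortI (pvKeys borders) ↔ q.1 ∈ pvYs borders := by
    rw [show pvSortI (pvKeys borders)
        = PySem.List.sorted (pvKeys borders) (fun x => x) false from rfl]
    rw [PySem.List.mem_sorted]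
    show q.1 ∈ PySem.Set.ofList (pvYs borders) ↔ _
    exact PySem.Set.mem_ofList _ _
  by_cases h : q.1 ∈ pvYs borders
  · simp [h, hmem.mpr h]
  · have h2 : q.1 ∉ pvSortI (pvKeys borders) := fun hc => h (hmem.mp hc)
    simp [h, h2]

lemma pv_blocks_pairwise (borders : List (Int × Int × String)) :
    (pvBlocks borders).Pairwise (fun a b => toLex a ≤ toLex b) := by
  unfold pvBlocks
  rw [List.pairwise_flatMap]
  constructor
  · intro y _
    rw [List.pairwise_map]
    refine List.Pairwise.imp ?_ (PySem.List.sorted_pairwise (pvXs borders y) (fun x => x))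
    intro a b h
    exact Prod.Lex.toLex_le_toLex.mpr (Or.inr ⟨rfl, h⟩)
  · refine (pv_keys_sorted_lt borders).imp ?_
    intro y1 y2 h p hp r hr
    obtain ⟨x1, _, rfl⟩ := List.mem_map.mp hp
    obtain ⟨x2, _, rfl⟩ := List.mem_map.mp hr
    exact Prod.Lex.toLex_le_toLex.mpr (Or.inl h)

lemma pv_sorted_Q (borders : List (Int × Int × String)) :
    PySem.List.sorted (pvQ borders) (fun q => toLex q) = pvBlocks borders := by
  apply PySem.List.eq_of_perm_of_pairwise_le_of_injective (fun q : Int × Int => toLex q)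
  · exact fun a b h => toLex.injective h
  · exact (PySem.List.sorted_perm (pvQ borders) _ false).trans (pv_blocks_perm borders).symm
  · exact PySem.List.sorted_pairwise (pvQ borders) _
  · exact pv_blocks_pairwise borders

-- ---- B: the single pass over the blocks ----
lemma pv_foldB_inner (t : List Int) (y x s : Int) :
    (t.map (fun x => (y, x))).foldl pvStepB (s, some (y, x))
      = (s + (pvRunS (0, x) t).1, some (y, (pvRunS (0, x) t).2)) := by
  induction t generalizing x s with
  | nil => simp [pvRunS]
  | cons a t ih =>
      simp only [List.map_cons, List.foldl_cons]
      have hred : pvStepB (s, some (y, x)) (y, a)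
          = ((if a - x ≠ 1 then s + 1 else s), some (y, a)) := by
        show ((if y ≠ y ∨ a - x ≠ 1 then s + 1 else s), some (y, a)) = _
        simp
      rw [hred, ih]
      have hr : pvRunS (0, x) (a :: t)
          = (((if a - x ≠ 1 then (0:Int) + 1 else 0) + (pvRunS (0, a) t).1),
              (pvRunS (0, a) t).2) := by
        show pvRunS ((if a - x ≠ 1 then (0:Int) + 1 else 0), a) t = _
        rw [pv_runS_shift]
      rw [hr]
      by_cases hd : a - x ≠ 1
      · simp only [if_pos hd]
        refine Prod.ext ?_ rfl
        simp only []
        ring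
      · simp only [if_neg hd]
        refine Prod.ext ?_ rfl
        simp only []
        ring

lemma pv_foldB_block (t : List Int) (h y s : Int) (prev : Option (Int × Int))
    (hprev : ∀ q, prev = some q → q.1 ≠ y) :
    ((h :: t).map (fun x => (y, x))).foldl pvStepB (s, prev)
      = (s + (1 + (pvRunS (0, h) t).1), some (y, (pvRunS (0, h) t).2)) := by
  simp only [List.map_cons, List.foldl_cons]
  have hred : pvStepB (s, prev) (y, h) = (s + 1, some (y, h)) := by
    cases prev with
    | none => rfl
    | some q =>
        have hq := hprev q rfl
        show ((if q.1 ≠ y ∨ h - q.2 ≠ 1 then s + 1 else s), some (y, h)) = _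
        simp [hq]
  rw [hred, pv_foldB_inner]
  refine Prod.ext ?_ rfl
  simp only []
  ring

lemma pv_foldB_flatMap (ds : List Int) (f : Int → List Int) (s : Int)
    (prev : Option (Int × Int)) (hprev : ∀ q, prev = some q → q.1 ∉ ds)
    (hnd : ds.Nodup) (hne : ∀ y ∈ ds, f y ≠ []) :
    ((ds.flatMap (fun y => (f y).map (fun x => (y, x)))).foldl pvStepB (s, prev)).1
      = s + ((ds.map (fun y => pvCntB (f y))).sum) := by
  induction ds generalizing s prev with
  | nil => simp
  | cons d ds ih =>
      rcases List.nodup_cons.mp hnd with ⟨hd, hnd'⟩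
      obtain ⟨h, t, hft⟩ : ∃ h t, f d = h :: t := by
        cases hfd : f d with
        | nil => exact absurd hfd (hne d (List.mem_cons_self))
        | cons a b => exact ⟨a, b, rfl⟩
      rw [List.flatMap_cons, List.foldl_append, hft]
      rw [pv_foldB_block t h d s prev
        (fun q hq he => (hprev q hq) (he ▸ List.mem_cons_self))]
      simp only [List.map_cons, List.sum_cons]
      rw [ih (s + (1 + (pvRunS (0, h) t).1)) (some (d, (pvRunS (0, h) t).2))
        (fun q hq => by cases hq; exact hd)
        hnd' (fun y hy => hne y (List.mem_cons_of_mem d hy))]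
      rw [hft]
      have hc : pvCntB (h :: t) = 1 + (pvRunS (0, h) t).1 := rfl
      rw [hc]
      ring

lemma pv_B_sum (borders : List (Int × Int × String)) :
    sidesDown_alt borders
      = ((pvKeys borders).map (fun y => pvCntB (pvSortI (pvXs borders y)))).sum := by
  have h0 : sidesDown_alt borders
      = ((PySem.List.sorted2 (pvQ borders) Prod.fst Prod.snd).foldl pvStepB
          ((0:Int), (none : Option (Int × Int)))).1 := rfl
  rw [h0, pv_sorted2_eq_lex, pv_sorted_Q]
  have hnd : (pvSortI (pvKeys borders)).Nodup :=
    (pv_keys_sorted_lt borders).imp ne_of_lt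
  have hne : ∀ y ∈ pvSortI (pvKeys borders), pvSortI (pvXs borders y) ≠ [] := by
    intro y hy
    have hy2 : y ∈ pvYs borders := by
      have := (PySem.List.mem_sorted (pvKeys borders) (fun x => x) false y).mp hy
      exact (PySem.Set.mem_ofList (pvYs borders) y).mp this
    intro hnil
    exact (pv_mem_ys_iff borders y).mp hy2
      ((PySem.List.sorted_eq_nil_iff (pvXs borders y) (fun x => x) false).mp hnil)
  have h1 := pv_foldB_flatMap (pvSortI (pvKeys borders))
      (fun y => pvSortI (pvXs borders y)) 0 none (by simp) hnd hne
  unfold pvBlocks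
  rw [h1, zero_add]
  exact List.Perm.sum_eq
    (List.Perm.map _ (PySem.List.sorted_perm (pvKeys borders) (fun x => x) false))

-- ---- the per-row comparison ----
lemma pv_group_eq (g : List Int) (hne : g ≠ []) :
    pvCntB (pvSortI g) = calcSidesDiff (pvSortI g) + pvBadI g := by
  obtain ⟨h, t, hg⟩ : ∃ a t, pvSortI g = a :: t := by
    cases hs : pvSortI g with
    | nil => exact absurd ((PySem.List.sorted_eq_nil_iff g (fun x => x) false).mp hs) hne
    | cons a t => exact ⟨a, t, rfl⟩
  have hlen : g.length = t.length + 1 := by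
    have h2 : (pvSortI g).length = g.length := PySem.List.length_sorted g (fun x => x) false
    rw [hg] at h2
    simpa using h2.symm
  rw [hg]
  cases t with
  | nil =>
      have hbad : pvBadGroup g = false := by
        unfold pvBadGroup
        simp [hlen]
      have hc : calcSidesDiff [h] = 1 := by
        unfold calcSidesDiff
        simp
      have hb : pvCntB [h] = 1 := by
        unfold pvCntB
        simp [pvRunS]
      rw [hc, hb, pvBadI, hbad]
      simp
  | cons a t' =>
      have hmemh : h ∈ g := by
        have hm : h ∈ pvSortI g := by rw [hg]; exact List.mem_cons_self
        exact (PySem.List.mem_sorted g (fun x => x) false h).mp hm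
      have hminh : ∀ x ∈ g, h ≤ x := by
        have hgeq : PySem.List.sorted g (fun x => x) = h :: (a :: t') := hg
        exact PySem.List.key_head_sorted_le g (fun x => x) hgeq
      have hbadiff : pvBadGroup g = true ↔ h = -9 := by
        unfold pvBadGroup
        simp only [Bool.and_eq_true, decide_eq_true_eq, List.all_eq_true]
        constructor
        · rintro ⟨⟨-, hm⟩, hall⟩
          have h1 : h ≤ -9 := hminh _ hm
          have h2 : (-9 : Int) ≤ h := by simpa using hall h hmemh
          omega
        · intro hh
          subst hh
          refine ⟨⟨by simp only [hlen, List.length_cons]; omega, hmemh⟩, ?_⟩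
          intro x hx
          simpa using hminh x hx
      have hcalc : calcSidesDiff (h :: a :: t')
          = (if h - (-10) ≠ 1 then (0:Int) + 1 else 0) + (pvRunS (0, h) (a :: t')).1 := by
        unfold calcSidesDiff
        rw [if_neg (by simp)]
        show (pvRunS ((if h - (-10) ≠ 1 then (0:Int) + 1 else 0), h) (a :: t')).1 = _
        rw [pv_runS_shift]
      have hcnt : pvCntB (h :: a :: t') = 1 + (pvRunS (0, h) (a :: t')).1 := rfl
      rw [hcalc, hcnt]
      unfold pvBadI
      by_cases hh : h = -9
      · rw [if_pos (hbadiff.mpr hh)]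
        subst hh
        rw [if_neg (by norm_num)]
        ring
      · have : pvBadGroup g = false := by
          cases hb : pvBadGroup g with
          | false => rfl
          | true => exact absurd (hbadiff.mp hb) hh
        rw [this]
        have hne10 : h - (-10) ≠ 1 := by omega
        rw [if_pos hne10]
        simp

lemma pv_main (borders : List (Int × Int × String)) :
    sidesDown_alt borders
      = sidesDown borders + ((pvKeys borders).map (fun y => pvBadI (pvXs borders y))).sum := by
  rw [pv_B_sum, pv_A_sum]
  have hc : ∀ y ∈ pvKeys borders,
      pvCntB (pvSortI (pvXs borders y))
        = calcSidesDiff (pvSortI (pvXs borders y)) + pvBadI (pvXs borders y) := by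
    intro y hy
    refine pv_group_eq _ ?_
    have hys : y ∈ pvYs borders := (PySem.Set.mem_ofList (pvYs borders) y).mp hy
    exact (pv_mem_ys_iff borders y).mp hys
  rw [List.map_congr_left hc]
  induction pvKeys borders with
  | nil => simp
  | cons k ks ih =>
      simp only [List.map_cons, List.sum_cons, ih]
      ring

lemma pv_noBad (borders : List (Int × Int × String)) (h : ¬ D_sidesDown borders) :
    ((pvKeys borders).map (fun y => pvBadI (pvXs borders y))).sum = 0 := by
  have hz : ∀ y ∈ pvKeys borders, pvBadI (pvXs borders y) = 0 := by
    intro y hy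
    have hys : y ∈ pvYs borders := (PySem.Set.mem_ofList (pvYs borders) y).mp hy
    obtain ⟨c, hc, hcy⟩ := List.mem_map.mp hys
    unfold pvBadI
    cases hb : pvBadGroup (pvXs borders y) with
    | false => rfl
    | true => exact absurd ((pv_D_iff borders).mpr ⟨c, hc, by rw [hcy]; exact hb⟩) h
  rw [List.map_congr_left hz]
  simp

lemma pv_someBad (borders : List (Int × Int × String)) (h : D_sidesDown borders) :
    1 ≤ ((pvKeys borders).map (fun y => pvBadI (pvXs borders y))).sum := by
  obtain ⟨c, hc, hb⟩ := (pv_D_iff borders).mp h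
  have hys : c.2.1 ∈ pvYs borders := List.mem_map.mpr ⟨c, hc, rfl⟩
  have hk : c.2.1 ∈ pvKeys borders := (PySem.Set.mem_ofList (pvYs borders) c.2.1).mpr hys
  have hmem : (1 : Int) ∈ (pvKeys borders).map (fun y => pvBadI (pvXs borders y)) :=
    List.mem_map.mpr ⟨c.2.1, hk, by unfold pvBadI; rw [hb]; rfl⟩
  have hpos : ∀ x ∈ (pvKeys borders).map (fun y => pvBadI (pvXs borders y)), (0:Int) ≤ x := by
    intro x hx
    obtain ⟨y, -, rfl⟩ := List.mem_map.mp hx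
    unfold pvBadI
    split <;> omega
  exact List.single_le_sum hpos 1 hmem

-- ===== VERDICT (by name: the statement is the Claim_ definition above) =====
theorem sidesDown_spec : Claim_unchanged_sidesDown := by
  intro borders _ hD
  have := pv_main borders
  rw [pv_noBad borders hD] at this
  omega

theorem sidesDown_changed : Claim_changed_sidesDown := by
  unfold Claim_changed_sidesDown; decide

theorem sidesDown_tight : Claim_exact_sidesDown := by
  intro borders _ hD
  have h1 := pv_main borders
  have h2 := pv_someBad borders hD
  omega
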